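-- pv_equiv track=rewrite | github.com/ToufiqTushar/CareFlow-AI-Hospital-Management-System | project/algorithms/route_finder.py | get_all_routes
-- ===== SOURCE A (Python) =====
-- def get_all_routes(graph, start, goal):
--     """Get all possible routes (for comparison)"""
--     def dfs(current, path, visited, weight):
--         if current == goal:
--             return [(path + [current], weight)]
--
--         routes = []
--         visited.add(current)
--
--         for neighbor, w in graph.get(current, []):
--             if neighbor not in visited:
--                 new_routes = dfs(neighbor, path + [current],
--                                visited.copy(), weight + w)
--                 routes.extend(new_routes)
--
--         return routes
--
--     all_routes = dfs(start, [], set(), 0)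
--     return sorted(all_routes, key=lambda x: x[1])  # Sort by cost
-- ===== SOURCE B (Python) =====
-- def get_all_routes(graph, start, goal):
--     """Get all possible routes (for comparison)"""
--     results = []
--     stack = [(start, [], 0)]  # (current, path so far, accumulated weight)
--     while stack:
--         current, path, weight = stack.pop()
--         path = path + [current]
--         if current == goal:
--             results.append((path, weight))
--             continue
--         # push in reverse so neighbors are expanded in adjacency order
--         for neighbor, w in reversed(graph.get(current, [])):
--             if neighbor not in path:
--                 stack.append((neighbor, path, weight + w))
--     return sorted(results, key=lambda x: x[1])  # Sort by cost
-- ===== Notes on version B (the rewrite author's own statement) =====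
-- stated objective: alternative
-- what changed: Replaced the recursive dfs with copied visited-sets by an iterative DFS over an explicit stack of (node, path, weight) frames that uses path membership itself as the visited test, pushing neighbors in reverse to keep the exact result order before the final stable sort.
import Mathlib
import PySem

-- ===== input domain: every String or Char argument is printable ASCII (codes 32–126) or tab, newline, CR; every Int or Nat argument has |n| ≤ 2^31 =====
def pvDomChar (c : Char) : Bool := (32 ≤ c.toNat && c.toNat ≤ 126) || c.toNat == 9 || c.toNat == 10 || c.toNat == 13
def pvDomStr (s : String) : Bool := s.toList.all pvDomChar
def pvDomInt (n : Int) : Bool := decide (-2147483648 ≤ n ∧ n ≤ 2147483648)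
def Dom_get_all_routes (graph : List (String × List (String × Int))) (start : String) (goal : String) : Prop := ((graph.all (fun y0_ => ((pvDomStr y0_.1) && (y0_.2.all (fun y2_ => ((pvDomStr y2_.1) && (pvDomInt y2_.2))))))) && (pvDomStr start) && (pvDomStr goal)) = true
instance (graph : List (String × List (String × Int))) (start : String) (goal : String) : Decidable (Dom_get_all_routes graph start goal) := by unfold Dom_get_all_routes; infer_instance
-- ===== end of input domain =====

-- ===== PORT A =====
-- B is an iterative explicit-stack DFS using path membership as the visited test; same values as A's
-- recursive dfs with copied visited sets (alternative decomposition, not claimed faster).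
-- The Nat fuel in both ports is only a termination guard (recursion depth is bounded by
-- #keys + #edges + 1, so it never runs out); the equivalence theorem holds for the shared fuel value.

-- bound used only by the termination measure of the B-side loop
def pvSb (M : Nat) : Nat -> Nat
  | 0 => 1
  | f + 1 => 1 + M * pvSb M f

theorem pvSb_pos (M f : Nat) : 0 < pvSb M f := by
  cases f <;> simp [pvSb]

def pvMaxDeg (graph : List (String × List (String × Int))) : Nat :=
  (graph.map (fun e => e.2.length)).foldr max 0

theorem pvAdj_len_le (graph : List (String × List (String × Int))) (c : String) :
    ((PySem.Dict.mk graph).getD c []).length ≤ pvMaxDeg graph := by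
  induction graph with
  | nil => exact Nat.le_refl 0
  | cons e rest ih =>
      simp only [PySem.Dict.getD, PySem.Dict.get?] at *
      simp only [pvMaxDeg, List.map_cons, List.foldr_cons] at *
      by_cases h : e.1 == c
      · simp [h]
      · simp [h]
        exact Or.inr ih

-- port of A's inner dfs (literal: goal test, visited.add(current), foldl over graph.get
-- extending routes for each unvisited neighbor with visited.copy() = the persistent set)
def pvDfsA (graph : List (String × List (String × Int))) (goal : String) :
    Nat -> String -> List String -> PySem.Set String -> Int -> List (List String × Int)
  | fuel, current, path, visited, weight =>
    if current == goal then [(path ++ [current], weight)]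
    else
      match fuel with
      | 0 => []  -- fuel guard, unreachable with the fuel supplied below
      | fuel + 1 =>
        let visited' := PySem.Set.add visited current
        ((PySem.Dict.mk graph).getD current []).foldl
          (fun routes nw =>
            if !(PySem.Set.contains visited' nw.1) then
              routes ++ pvDfsA graph goal fuel nw.1 (path ++ [current]) visited' (weight + nw.2)
            else routes) []

def get_all_routes (graph : List (String × List (String × Int))) (start : String) (goal : String) : List (List String × Int) :=
  PySem.List.sorted
    (pvDfsA graph goal (graph.length + (graph.map (fun e => e.2.length)).sum + 1) start [] PySem.Set.empty 0)
    (fun x => x.2) false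

-- ===== PORT B =====
-- port of B's while-loop; the Python stack (append/pop at the end) is the Lean list with its head
-- as the top, so pushing reversed(graph.get(current, [])) one by one is consing the kept neighbors
-- in original adjacency order in front of the remaining stack.
def pvLoopB (graph : List (String × List (String × Int))) (goal : String) :
    List (String × List String × Int × Nat) -> List (List String × Int) -> List (List String × Int)
  | [], results => results
  | (current, path, weight, fuel) :: stack, results =>
    let path' := path ++ [current]
    if current == goal then pvLoopB graph goal stack (results ++ [(path', weight)])
    else
      match fuel with
      | 0 => pvLoopB graph goal stack results  -- fuel guard, unreachable with the fuel supplied below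
      | fuel + 1 =>
        pvLoopB graph goal
          ((((PySem.Dict.mk graph).getD current []).filter (fun nw => !(path'.contains nw.1))).map
              (fun nw => (nw.1, path', weight + nw.2, fuel)) ++ stack)
          results
termination_by stack _ => (stack.map (fun fr => pvSb (pvMaxDeg graph) fr.2.2.2)).sum
decreasing_by
  · simp only [List.map_cons, List.sum_cons]
    have := pvSb_pos (pvMaxDeg graph) fuel; omega
  · simp only [List.map_cons, List.sum_cons]
    have := pvSb_pos (pvMaxDeg graph) 0; omega
  · simp only [List.map_append, List.sum_append, List.map_cons, List.sum_cons]
    have key : ∀ (L : List (String × Int)), L.length ≤ pvMaxDeg graph →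
        ((L.map (fun nw => (nw.1, path', weight + nw.2, fuel))).map
            (fun fr => pvSb (pvMaxDeg graph) fr.2.2.2)).sum < pvSb (pvMaxDeg graph) (fuel + 1) := by
      have hsum : ∀ (L : List (String × Int)), ((L.map (fun nw => (nw.1, path', weight + nw.2, fuel))).map
          (fun fr => pvSb (pvMaxDeg graph) fr.2.2.2)).sum = L.length * pvSb (pvMaxDeg graph) fuel := by
        intro L
        induction L with
        | nil => simp
        | cons a l ih =>
            simp only [List.map_cons, List.sum_cons, List.length_cons, ih]
            ring
      intro L hL
      rw [hsum]
      have hm : L.length * pvSb (pvMaxDeg graph) fuel ≤ pvMaxDeg graph * pvSb (pvMaxDeg graph) fuel :=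
        Nat.mul_le_mul_right _ hL
      simp only [pvSb]; omega
    exact Nat.add_lt_add_right
      (key _ (le_trans (List.length_filter_le _ _) (pvAdj_len_le graph current))) _

def get_all_routes_alt (graph : List (String × List (String × Int))) (start : String) (goal : String) : List (List String × Int) :=
  PySem.List.sorted
    (pvLoopB graph goal [(start, [], 0, graph.length + (graph.map (fun e => e.2.length)).sum + 1)] [])
    (fun x => x.2) false

-- ===== PRECONDITION & SPEC =====
def Spec_get_all_routes (graph : List (String × List (String × Int))) (start : String) (goal : String) (out : List (List String × Int)) : Prop := out = get_all_routes_alt graph start goal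
instance (graph : List (String × List (String × Int))) (start : String) (goal : String) (out : List (List String × Int)) : Decidable (Spec_get_all_routes graph start goal out) := by unfold Spec_get_all_routes; infer_instance

-- ===== CLAIM (what is proved, stated in full; the proofs are below) =====
def Claim_equal_get_all_routes : Prop := ∀ (graph : List (String × List (String × Int))) (start : String) (goal : String), Dom_get_all_routes graph start goal → Spec_get_all_routes graph start goal (get_all_routes graph start goal)

-- ===== LEMMAS AND PROOFS =====

-- recursive description of what processing one stack frame of B produces
def pvRunB (graph : List (String × List (String × Int))) (goal : String) :
    Nat -> String -> List String -> Int -> List (List String × Int)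
  | fuel, current, path, weight =>
    if current == goal then [(path ++ [current], weight)]
    else
      match fuel with
      | 0 => []
      | fuel + 1 =>
        (((PySem.Dict.mk graph).getD current []).filter (fun nw => !((path ++ [current]).contains nw.1))).flatMap
          (fun nw => pvRunB graph goal fuel nw.1 (path ++ [current]) (weight + nw.2))

theorem pvDfsA_eq_runB (graph : List (String × List (String × Int))) (goal : String) :
    ∀ (fuel : Nat) (current : String) (path : List String) (visited : PySem.Set String) (weight : Int),
      (∀ x : String, x ∈ visited ↔ x ∈ path) →
      pvDfsA graph goal fuel current path visited weight = pvRunB graph goal fuel current path weight := by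
  intro fuel
  induction fuel with
  | zero =>
      intro current path visited weight _
      rw [pvDfsA, pvRunB]
  | succ f ih =>
      intro current path visited weight hinv
      rw [pvDfsA, pvRunB]
      by_cases hg : (current == goal) = true
      · simp only [hg, if_true]
      · simp only [hg, Bool.false_eq_true, if_false]
        have hinv' : ∀ x : String, x ∈ PySem.Set.add visited current ↔ x ∈ path ++ [current] := by
          intro x
          simp [PySem.Set.mem_add, hinv x]
        have aux : ∀ (L : List (String × Int)) (acc : List (List String × Int)),
            L.foldl (fun routes nw =>
                if !(PySem.Set.contains (PySem.Set.add visited current) nw.1) then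
                  routes ++ pvDfsA graph goal f nw.1 (path ++ [current]) (PySem.Set.add visited current) (weight + nw.2)
                else routes) acc
            = acc ++ (L.filter (fun nw => !((path ++ [current]).contains nw.1))).flatMap
                (fun nw => pvRunB graph goal f nw.1 (path ++ [current]) (weight + nw.2)) := by
          intro L
          induction L with
          | nil => intro acc; simp
          | cons a l ihl =>
              intro acc
              have hc : PySem.Set.contains (PySem.Set.add visited current) a.1
                  = (path ++ [current]).contains a.1 := by
                rw [Bool.eq_iff_iff]
                simp [hinv' a.1]
              simp only [List.foldl_cons, List.filter_cons]
              by_cases hm : ((path ++ [current]).contains a.1) = true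
              · rw [hc, hm]
                simp only [Bool.not_true, Bool.false_eq_true, if_false]
                exact ihl acc
              · have hm' : (path ++ [current]).contains a.1 = false := by
                  cases h : (path ++ [current]).contains a.1
                  · rfl
                  · exact absurd h hm
                rw [hc, hm']
                simp only [Bool.not_false, if_true, List.flatMap_cons]
                rw [ihl, ih _ _ _ _ hinv', List.append_assoc]
        rw [aux]
        simp

theorem pvLoopB_frame (graph : List (String × List (String × Int))) (goal : String) :
    ∀ (fuel : Nat) (current : String) (path : List String) (weight : Int)
      (stack : List (String × List String × Int × Nat)) (results : List (List String × Int)),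
      pvLoopB graph goal ((current, path, weight, fuel) :: stack) results
        = pvLoopB graph goal stack (results ++ pvRunB graph goal fuel current path weight) := by
  intro fuel
  induction fuel with
  | zero =>
      intro current path weight stack results
      rw [pvLoopB, pvRunB]
      by_cases hg : (current == goal) = true
      · simp [hg]
      · simp [hg]
  | succ f ih =>
      intro current path weight stack results
      rw [pvLoopB, pvRunB]
      by_cases hg : (current == goal) = true
      · simp [hg]
      · simp only [hg, Bool.false_eq_true, if_false]
        have aux : ∀ (L : List (String × Int)) (stack : List (String × List String × Int × Nat))
            (results : List (List String × Int)),
            pvLoopB graph goal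
              ((L.map (fun nw => (nw.1, path ++ [current], weight + nw.2, f))) ++ stack) results
            = pvLoopB graph goal stack
                (results ++ L.flatMap (fun nw => pvRunB graph goal f nw.1 (path ++ [current]) (weight + nw.2))) := by
          intro L
          induction L with
          | nil => intro stack results; simp
          | cons a l ihl =>
              intro stack results
              simp only [List.map_cons, List.cons_append, List.flatMap_cons]
              rw [ih, ihl, List.append_assoc]
        exact aux _ _ _

-- ===== VERDICT (by name: the statement is the Claim_ definition above) =====
theorem get_all_routes_spec : Claim_equal_get_all_routes := by
  intro graph start goal _
  unfold Spec_get_all_routes get_all_routes get_all_routes_alt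
  rw [pvLoopB_frame, pvDfsA_eq_runB]
  · simp only [pvLoopB, List.nil_append]
  · intro x; simp [PySem.Set.empty]
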